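-- pv_equiv track=rewrite | github.com/Boykinz/codewars-solutions | 5_kyu/diophantine_equation.py | sol_equa
-- ===== SOURCE A (Python) =====
-- from math import sqrt
--
-- def sol_equa(n):
--     arr = []
--     for a in range(1, int(sqrt(n))+2):
--         if n % a == 0:
--             b = n // a
--             x = (a + b) // 2
--             y = (b - a) // 4
--             if x**2 - 4*y**2 == n:
--                 arr.append([x, y])
--     return arr
-- ===== SOURCE B (Python) =====
-- def sol_equa(n):
--     if n <= 0:
--         return []
--     # prime factorisation of n by trial division
--     fac = []
--     m = n
--     p = 2
--     while p * p <= m: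
--         if m % p == 0:
--             e = 0
--             while m % p == 0:
--                 m //= p
--                 e += 1
--             fac.append((p, e))
--         p += 1
--     if m > 1:
--         fac.append((m, 1))
--     # all divisors of n, generated multiplicatively from the factorisation
--     divs = [1]
--     for p, e in fac:
--         divs = [d * p ** i for d in divs for i in range(e + 1)]
--     res = []
--     for a in sorted(divs):
--         b = n // a
--         if a <= b and (b - a) % 4 == 0:
--             res.append([(a + b) // 2, (b - a) // 4])
--     return res
-- ===== Notes on version B (the rewrite author's own statement) =====
-- stated objective: alternative
-- what changed: B abandons A's direct divisor scan: it trial-factorizes n into prime powers, generates the complete divisor list multiplicatively from the factorization, sorts it, and emits [(a+b)//2,(b-a)//4] for each divisor a with a <= b = n//a and (b-a) % 4 == 0, with no per-candidate reconstruct-and-verify of the equation; Pre_ excludes n < 0 (A raises ValueError in math.sqrt) and the sparse family n = 4(4k+1)(2k+1), where A's floor divisions list the solution [6k+2,k] twice while B lists each solution once - equal as sets of solutions, but no single repetition count is the specified one.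
-- outside the precondition, e.g. on sol_equa(4): A returns [[2, 0], [2, 0]], B returns [[2, 0]]; on sol_equa(60): A returns [[16, 7], [8, 1], [8, 1]], B returns [[16, 7], [8, 1]]
import Mathlib
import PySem

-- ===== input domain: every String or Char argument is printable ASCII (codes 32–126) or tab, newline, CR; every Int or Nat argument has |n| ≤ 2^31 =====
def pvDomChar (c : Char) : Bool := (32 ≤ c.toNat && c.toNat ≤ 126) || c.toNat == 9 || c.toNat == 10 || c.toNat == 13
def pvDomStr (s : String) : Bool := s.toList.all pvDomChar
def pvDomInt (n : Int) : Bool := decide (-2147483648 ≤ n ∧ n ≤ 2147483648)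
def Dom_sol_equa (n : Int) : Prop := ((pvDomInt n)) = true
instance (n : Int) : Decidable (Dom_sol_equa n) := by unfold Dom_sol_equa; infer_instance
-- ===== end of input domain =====

-- B replaces A's direct divisor scan by a different algorithm: trial-factorize n into prime
-- powers, generate the complete divisor list multiplicatively, sort it, and emit a row for each
-- divisor a with a ≤ n//a and (n//a - a) % 4 == 0 (no per-candidate equation re-verification).

-- integer square root (⌊√n⌋), helper for port A (math.sqrt) and for Pre_'s square test:
-- structural fuel recursion so that kernel evaluation works; pvIsqrt n = Nat.sqrt n (proved below)
def pvIsqrtFuel : Nat → Nat → Nat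
  | 0, _ => 0
  | fuel + 1, n =>
    if n < 2 then n
    else
      let r := 2 * pvIsqrtFuel fuel (n / 4)
      if (r + 1) * (r + 1) ≤ n then r + 1 else r
def pvIsqrt (n : Nat) : Nat := pvIsqrtFuel n n

-- ===== PORT A =====
-- int(sqrt(n)): for 0 ≤ n ≤ 2^31 the double sqrt is exact enough that int(sqrt(n)) = isqrt(n),
-- ported as pvIsqrt n.toNat; for n < 0 math.sqrt raises ValueError — excluded by Pre_.
def sol_equa (n : Int) : List (List Int) :=
  (PySem.List.pyRange 1 ((pvIsqrt n.toNat : Int) + 2) 1).foldl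
    (fun arr a =>
      if PySem.Int.mod n a == 0 then
        let b := PySem.Int.floordiv n a
        let x := PySem.Int.floordiv (a + b) 2
        let y := PySem.Int.floordiv (b - a) 4
        if x ^ 2 - 4 * y ^ 2 == n then arr ++ [[x, y]] else arr
      else arr) []

-- ===== PORT B =====
-- inner 'while m % p == 0: m //= p; e += 1' of Source B, as fuel recursion over the same state
-- (m.toNat fuel suffices: m strictly shrinks at each division; proved in pvDivOut_ok below)
def pvDivOutFuel : Nat → Int → Int → Int → Int × Int
  | 0, m, _, e => (m, e)
  | f + 1, m, p, e =>
    if PySem.Int.mod m p == 0 then pvDivOutFuel f (PySem.Int.floordiv m p) p (e + 1)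
    else (m, e)

-- outer 'while p * p <= m:' trial-division loop of Source B, as fuel recursion over the same state
-- (fuel m.toNat + 2 suffices: p grows and m shrinks; proved in pvFact_ok below)
def pvFactFuel : Nat → List (Int × Int) → Int → Int → List (Int × Int) × Int
  | 0, fac, m, _ => (fac, m)
  | f + 1, fac, m, p =>
    if p * p ≤ m then
      if PySem.Int.mod m p == 0 then
        let me := pvDivOutFuel m.toNat m p 0
        pvFactFuel f (fac ++ [(p, me.2)]) me.1 (p + 1)
      else pvFactFuel f fac m (p + 1)
    else (fac, m)

-- port of Source B: factorize, generate the divisors ([d * p**i for d in divs for i in range(e+1)]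
-- is flatMap over divs of map over range; i ≥ 0 there, so p ** i is ported as p ^ i.toNat),
-- sort them (sorted(divs) = PySem.List.sorted with identity key), then emit the rows
def sol_equa_alt (n : Int) : List (List Int) :=
  if n ≤ 0 then []
  else
    let fm := pvFactFuel (n.toNat + 2) [] n 2
    let fac := if 1 < fm.2 then fm.1 ++ [(fm.2, 1)] else fm.1
    let divs := fac.foldl
      (fun divs pe =>
        divs.flatMap (fun d => (PySem.List.pyRange 0 (pe.2 + 1) 1).map (fun i => d * pe.1 ^ i.toNat))) [1]
    (PySem.List.sorted divs (fun d => d) false).foldl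
      (fun res a =>
        let b := PySem.Int.floordiv n a
        if decide (a ≤ b) && (PySem.Int.mod (b - a) 4 == 0) then
          res ++ [[PySem.Int.floordiv (a + b) 2, PySem.Int.floordiv (b - a) 4]]
        else res) []

-- ===== PRECONDITION & SPEC =====
-- pvDup n = true says n = 4(4k+1)(2k+1) for some k ≥ 0 (the closed form is proved as pvDup_iff
-- below): it tests that 128n+64 is the square (64k+24)^2, i.e. its integer square root is exact
-- and ≡ 24 mod 64
def pvDup (n : Int) : Bool :=
  (((pvIsqrt (128 * n + 64).toNat : Int)) * (pvIsqrt (128 * n + 64).toNat : Int) == 128 * n + 64) &&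
  (pvIsqrt (128 * n + 64).toNat % 64 == 24)

-- Pre_ excludes n < 0, where A raises ValueError (math.sqrt of a negative number), and the
-- sparse family n = 4(4k+1)(2k+1) (4, 60, 180, ...), where A's floor divisions make the divisor
-- 4k+1 accidentally pass the check and A lists the solution [6k+2,k] twice while B lists each
-- solution once — the two outputs are equal as sets of solutions but not as lists, and neither
-- repetition count is specified.
def Pre_sol_equa (n : Int) : Prop := 0 ≤ n ∧ pvDup n = false
instance (n : Int) : Decidable (Pre_sol_equa n) := by unfold Pre_sol_equa; infer_instance
def pvWitness_sol_equa : Int := (12)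

def Spec_sol_equa (n : Int) (out : List (List Int)) : Prop := out = sol_equa_alt n
instance (n : Int) (out : List (List Int)) : Decidable (Spec_sol_equa n out) := by unfold Spec_sol_equa; infer_instance

-- ===== CLAIM (what is proved, stated in full; the proofs are below) =====
def Claim_equal_sol_equa : Prop := ∀ (n : Int), Dom_sol_equa n → Pre_sol_equa n → Spec_sol_equa n (sol_equa n)

-- ===== LEMMAS AND PROOFS =====

theorem pvIsqrtFuel_eq_sqrt (fuel : Nat) : ∀ n : Nat, n ≤ fuel → pvIsqrtFuel fuel n = Nat.sqrt n := by
  induction fuel with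
  | zero => intro n hn; interval_cases n; simp [pvIsqrtFuel]
  | succ fuel ih =>
    intro n hn
    by_cases h2 : n < 2
    · interval_cases n <;> simp [pvIsqrtFuel]
    · have hrec : pvIsqrtFuel fuel (n / 4) = Nat.sqrt (n / 4) := ih _ (by omega)
      have h1 : Nat.sqrt (n / 4) * Nat.sqrt (n / 4) ≤ n / 4 := Nat.sqrt_le (n / 4)
      have h2' : n / 4 < (Nat.sqrt (n / 4) + 1) * (Nat.sqrt (n / 4) + 1) := Nat.lt_succ_sqrt (n / 4)
      set r := 2 * Nat.sqrt (n / 4) with hr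
      have hle : r * r ≤ n := by
        have : 4 * (Nat.sqrt (n / 4) * Nat.sqrt (n / 4)) ≤ 4 * (n / 4) := by omega
        calc r * r = 4 * (Nat.sqrt (n / 4) * Nat.sqrt (n / 4)) := by ring
        _ ≤ 4 * (n / 4) := this
        _ ≤ n := by omega
      have hlt : n < (r + 2) * (r + 2) := by
        have : 4 * (n / 4) + 3 < 4 * ((Nat.sqrt (n / 4) + 1) * (Nat.sqrt (n / 4) + 1)) := by omega
        calc n ≤ 4 * (n / 4) + 3 := by omega
        _ < 4 * ((Nat.sqrt (n / 4) + 1) * (Nat.sqrt (n / 4) + 1)) := this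
        _ = (r + 2) * (r + 2) := by ring
      simp only [pvIsqrtFuel, if_neg h2, hrec, ← hr]
      by_cases hcase : (r + 1) * (r + 1) ≤ n
      · rw [if_pos hcase]
        have u1 : r + 1 ≤ Nat.sqrt n := Nat.le_sqrt.mpr hcase
        have u2 : Nat.sqrt n < r + 2 := by
          by_contra hcon
          have : (r + 2) * (r + 2) ≤ n := Nat.le_sqrt.mp (by omega)
          omega
        omega
      · rw [if_neg hcase]
        have u1 : r ≤ Nat.sqrt n := Nat.le_sqrt.mpr hle
        have u2 : Nat.sqrt n < r + 1 := by
          by_contra hcon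
          have : (r + 1) * (r + 1) ≤ n := Nat.le_sqrt.mp (by omega)
          omega
        omega

theorem pvIsqrt_eq_sqrt (n : Nat) : pvIsqrt n = Nat.sqrt n := pvIsqrtFuel_eq_sqrt n n le_rfl

theorem pvDup_iff (n : Int) : pvDup n = true ↔ ∃ k : Nat, n = 4 * (4 * (k : Int) + 1) * (2 * (k : Int) + 1) := by
  unfold pvDup
  rw [Bool.and_eq_true, beq_iff_eq, beq_iff_eq, pvIsqrt_eq_sqrt]
  constructor
  · rintro ⟨h1, h2⟩
    set m : Nat := Nat.sqrt (128 * n + 64).toNat with hmdef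
    obtain ⟨j, hj⟩ : ∃ j : Nat, m = 64 * j + 24 := ⟨(m - 24) / 64, by omega⟩
    refine ⟨j, ?_⟩
    rw [hj] at h1
    push_cast at h1
    nlinarith [h1]
  · rintro ⟨k, hk⟩
    have hcast : 128 * n + 64 = (((64 * k + 24) * (64 * k + 24) : Nat) : Int) := by
      push_cast
      nlinarith [hk]
    have htn : (128 * n + 64).toNat = (64 * k + 24) * (64 * k + 24) := by
      rw [hcast, Int.toNat_natCast]
    have hsq : Nat.sqrt (128 * n + 64).toNat = 64 * k + 24 := by
      rw [htn, ← Nat.pow_two, Nat.sqrt_eq']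
    refine ⟨?_, ?_⟩
    · rw [hsq, hcast]; push_cast; ring
    · rw [hsq]; omega

-- ----- the two loops as filter-and-map -----
def pvBA (n a : Int) : Int := PySem.Int.floordiv n a
def pvXA (n a : Int) : Int := PySem.Int.floordiv (a + pvBA n a) 2
def pvYA (n a : Int) : Int := PySem.Int.floordiv (pvBA n a - a) 4
def pvPA (n a : Int) : Bool := (PySem.Int.mod n a == 0) && (pvXA n a ^ 2 - 4 * pvYA n a ^ 2 == n)
def pvGA (n a : Int) : List Int := [pvXA n a, pvYA n a]
def pvPB (n a : Int) : Bool := decide (a ≤ pvBA n a) && (PySem.Int.mod (pvBA n a - a) 4 == 0)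
-- the key a result row is ordered by: its second entry y
def pvKey (u : List Int) : Int := u.getD 1 0

theorem sol_equa_eq_filter (n : Int) :
    sol_equa n = ((PySem.List.pyRange 1 ((pvIsqrt n.toNat : Int) + 2) 1).filter (pvPA n)).map (pvGA n) := by
  unfold sol_equa
  have hbody : (fun (arr : List (List Int)) (a : Int) =>
      if PySem.Int.mod n a == 0 then
        let b := PySem.Int.floordiv n a
        let x := PySem.Int.floordiv (a + b) 2
        let y := PySem.Int.floordiv (b - a) 4
        if x ^ 2 - 4 * y ^ 2 == n then arr ++ [[x, y]] else arr
      else arr)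
      = fun arr a => if pvPA n a then arr ++ [pvGA n a] else arr := by
    funext arr a
    simp only [pvPA, pvGA, pvXA, pvYA, pvBA, Bool.and_eq_true]
    by_cases h1 : PySem.Int.mod n a == 0
    · by_cases h2 : PySem.Int.floordiv (a + PySem.Int.floordiv n a) 2 ^ 2 - 4 * PySem.Int.floordiv (PySem.Int.floordiv n a - a) 4 ^ 2 == n
      · simp [h1, h2]
      · simp [h1, h2]
    · simp [h1]
  rw [hbody, PySem.List.foldl_append_if (pvPA n) (pvGA n)]
  simp

-- B's final loop over the sorted divisor list, as filter-and-map
theorem B_loop_eq_filter (n : Int) (ds : List Int) :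
    ds.foldl
      (fun res a =>
        let b := PySem.Int.floordiv n a
        if decide (a ≤ b) && (PySem.Int.mod (b - a) 4 == 0) then
          res ++ [[PySem.Int.floordiv (a + b) 2, PySem.Int.floordiv (b - a) 4]]
        else res) []
    = (ds.filter (pvPB n)).map (pvGA n) := by
  have hbody : (fun (res : List (List Int)) (a : Int) =>
      let b := PySem.Int.floordiv n a
      if decide (a ≤ b) && (PySem.Int.mod (b - a) 4 == 0) then
        res ++ [[PySem.Int.floordiv (a + b) 2, PySem.Int.floordiv (b - a) 4]]
      else res)
      = fun res a => if pvPB n a then res ++ [pvGA n a] else res := by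
    funext res a
    rfl
  rw [hbody, PySem.List.foldl_append_if (pvPB n) (pvGA n)]
  simp

-- ----- arithmetic facts -----

theorem pv_sqrt_bounds (n : Int) (hn : 0 ≤ n) :
    ((Nat.sqrt n.toNat : Int)) * (Nat.sqrt n.toNat : Int) ≤ n ∧
    n < ((Nat.sqrt n.toNat : Int) + 1) * ((Nat.sqrt n.toNat : Int) + 1) := by
  have h1 := Nat.sqrt_le' n.toNat
  have h2 := Nat.lt_succ_sqrt' n.toNat
  have h3 : ((n.toNat : Int)) = n := Int.toNat_of_nonneg hn
  constructor
  · have := (Int.ofNat_le.mpr h1)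
    push_cast at this
    nlinarith [this]
  · have := (Int.ofNat_lt.mpr h2)
    push_cast at this
    nlinarith [this]

-- a divisor-pair basic fact: the cofactor is positive
theorem pv_cofactor_pos (n a b : Int) (hn : 1 ≤ n) (ha : 1 ≤ a) (hab : a * b = n) : 1 ≤ b := by
  by_contra hcon
  push_neg at hcon
  nlinarith

-- when 4 ∣ (n/a - a), A's floor divisions are exact and the check passes
theorem pA_parts (n a : Int) (hn : 1 ≤ n) (ha : 1 ≤ a) (hdvd : a ∣ n) (h4 : (4:Int) ∣ (n / a - a)) :
    pvPA n a = true ∧ 2 * pvXA n a = a + n / a ∧ 4 * pvYA n a = n / a - a := by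
  have hb : pvBA n a = n / a := PySem.Int.floordiv_eq_ediv_of_pos (by omega)
  set b := n / a with hbdef
  have hab : a * b = n := by rw [hbdef, mul_comm]; exact Int.ediv_mul_cancel hdvd
  have hx : pvXA n a = (a + b) / 2 := by
    unfold pvXA; rw [hb]; exact PySem.Int.floordiv_eq_ediv_of_pos (by omega)
  have hy : pvYA n a = (b - a) / 4 := by
    unfold pvYA; rw [hb]; exact PySem.Int.floordiv_eq_ediv_of_pos (by omega)
  have h2x : 2 * pvXA n a = a + b := by rw [hx]; omega
  have h4y : 4 * pvYA n a = b - a := by rw [hy]; omega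
  refine ⟨?_, h2x, h4y⟩
  have hchk : pvXA n a ^ 2 - 4 * pvYA n a ^ 2 = n := by
    have key : 4 * (pvXA n a ^ 2 - 4 * pvYA n a ^ 2) = 4 * n := by
      linear_combination (2 * pvXA n a + (a + b)) * h2x - (4 * pvYA n a + (b - a)) * h4y + 4 * hab
    linarith
  have hm : PySem.Int.mod n a = 0 := (PySem.Int.mod_eq_zero_iff_dvd n a).mpr hdvd
  simp [pvPA, hm, hchk]

-- if the check passes then either the division facts are genuine, or n is in the excluded family
theorem pA_imp (n a : Int) (hn : 1 ≤ n) (ha : 1 ≤ a) (hND : pvDup n = false) (hp : pvPA n a = true) :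
    a ∣ n ∧ (4:Int) ∣ (n / a - a) := by
  have hp' := hp
  unfold pvPA at hp'
  rw [Bool.and_eq_true, beq_iff_eq, beq_iff_eq] at hp'
  obtain ⟨hm, hchk⟩ := hp'
  have hdvd : a ∣ n := (PySem.Int.mod_eq_zero_iff_dvd n a).mp hm
  refine ⟨hdvd, ?_⟩
  have hb : pvBA n a = n / a := PySem.Int.floordiv_eq_ediv_of_pos (by omega)
  set b := n / a with hbdef
  have hab : a * b = n := by rw [hbdef, mul_comm]; exact Int.ediv_mul_cancel hdvd
  have hx : pvXA n a = (a + b) / 2 := by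
    unfold pvXA; rw [hb]; exact PySem.Int.floordiv_eq_ediv_of_pos (by omega)
  have hy : pvYA n a = (b - a) / 4 := by
    unfold pvYA; rw [hb]; exact PySem.Int.floordiv_eq_ediv_of_pos (by omega)
  set x := pvXA n a with hxdef
  set y := pvYA n a with hydef
  obtain ⟨e, he, he0, he2⟩ : ∃ e, a + b = 2 * x + e ∧ 0 ≤ e ∧ e < 2 := ⟨(a + b) % 2, by rw [hx]; omega, by omega, by omega⟩
  obtain ⟨r, hr, hr0, hr4⟩ : ∃ r, b - a = 4 * y + r ∧ 0 ≤ r ∧ r < 4 := ⟨(b - a) % 4, by rw [hy]; omega, by omega, by omega⟩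
  have lin : -2 * e * (a + b) + e ^ 2 + 2 * r * (b - a) - r ^ 2 = 0 := by
    have he' : e = a + b - 2 * x := by omega
    have hr' : r = b - a - 4 * y := by omega
    rw [he', hr']
    linear_combination 4 * hchk - 4 * hab
  have hpar : (e = 0 ∧ (r = 0 ∨ r = 2)) ∨ (e = 1 ∧ (r = 1 ∨ r = 3)) := by omega
  rcases hpar with ⟨he1, hr1 | hr1⟩ | ⟨he1, hr1 | hr1⟩
  · -- r = 0 : genuine
    exact ⟨y, by omega⟩
  · -- r = 2 : lin forces b - a = 1, impossible as b - a ≡ 2 [4]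
    rw [he1, hr1] at lin; omega
  · -- r = 1 : lin forces a = 0
    rw [he1, hr1] at lin; omega
  · -- r = 3 : lin forces b = 2a + 2, hence n in the excluded family
    rw [he1, hr1] at lin
    have hb2 : b = 2 * a + 2 := by omega
    have hay : a = 4 * y + 1 := by omega
    have hy0 : 0 ≤ y := by omega
    exfalso
    have hyt : ((y.toNat : Int)) = y := Int.toNat_of_nonneg hy0
    have hnval : n = 32 * y ^ 2 + 24 * y + 4 := by
      linear_combination -hab + (b + 2 * (4 * y + 1)) * hay + (4 * y + 1) * hb2
    have hdup : pvDup n = true := by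
      rw [pvDup_iff]
      refine ⟨y.toNat, ?_⟩
      rw [hyt]
      linear_combination hnval
    rw [hdup] at hND
    exact absurd hND (by simp)

-- the extra candidate a = s+1 that A inspects never passes A's check
theorem pA_top_false (n : Int) (hn : 1 ≤ n) (hND : pvDup n = false) :
    pvPA n ((Nat.sqrt n.toNat : Int) + 1) = false := by
  obtain ⟨hs1, hs2⟩ := pv_sqrt_bounds n (by omega)
  set s : Int := (Nat.sqrt n.toNat : Int) with hsdef
  have hs0 : 0 ≤ s := by positivity
  by_contra hcon
  rw [Bool.not_eq_false] at hcon
  set a : Int := s + 1 with hadef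
  have ha1 : 1 ≤ a := by omega
  obtain ⟨hdvd, h4⟩ := pA_imp n a hn ha1 hND hcon
  set b := n / a with hbdef
  have hab : a * b = n := by rw [hbdef, mul_comm]; exact Int.ediv_mul_cancel hdvd
  have hb1 : 1 ≤ b := pv_cofactor_pos n a b hn ha1 hab
  have hba : b < a := by nlinarith
  have hle4 : b - a ≤ -4 := by
    obtain ⟨c, hc⟩ := h4
    omega
  nlinarith

-- the canonical description both lists enumerate: solutions of x² - 4y² = n with x ≥ 1, y ≥ 0
def pvSol (n x y : Int) : Prop := 0 ≤ y ∧ 1 ≤ x ∧ x ^ 2 - 4 * y ^ 2 = n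

-- membership in A's list = being a solution row
theorem mem_A_iff (n : Int) (hn : 1 ≤ n) (hND : pvDup n = false) (u : List Int) :
    u ∈ (((PySem.List.pyRange 1 ((Nat.sqrt n.toNat : Int) + 1) 1).filter (pvPA n)).map (pvGA n)) ↔
      ∃ x y, u = [x, y] ∧ pvSol n x y := by
  obtain ⟨hs1, hs2⟩ := pv_sqrt_bounds n (by omega)
  set s : Int := (Nat.sqrt n.toNat : Int) with hsdef
  constructor
  · rintro hu
    obtain ⟨a, haf, hgu⟩ := List.mem_map.mp hu
    obtain ⟨har, hap⟩ := List.mem_filter.mp haf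
    obtain ⟨ha1, has⟩ := PySem.List.mem_pyRange_one.mp har
    obtain ⟨hdvd, h4⟩ := pA_imp n a hn ha1 hND hap
    obtain ⟨_, h2x, h4y⟩ := pA_parts n a hn ha1 hdvd h4
    set b := n / a with hbdef
    have hab : a * b = n := by rw [hbdef, mul_comm]; exact Int.ediv_mul_cancel hdvd
    have hb1 : 1 ≤ b := pv_cofactor_pos n a b hn ha1 hab
    have hba : a ≤ b := by nlinarith
    refine ⟨pvXA n a, pvYA n a, by simp [← hgu, pvGA], ?_, by omega, ?_⟩
    · omega
    · nlinarith [h2x, h4y, hab]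
  · rintro ⟨x, y, hu, hy0, hx1, heq⟩
    set a : Int := x - 2 * y with hadef
    set b : Int := x + 2 * y with hbdef
    have hab : a * b = n := by rw [hadef, hbdef]; ring_nf; linarith [heq]
    have ha1 : 1 ≤ a := by
      rcases lt_or_ge x (2 * y) with h | h
      · nlinarith
      · rcases eq_or_lt_of_le h with h' | h'
        · exfalso; nlinarith
        · omega
    have hb1 : b ≥ a := by omega
    have hbp : 1 ≤ b := by omega
    have has : a ≤ s := by nlinarith
    have hdvd : a ∣ n := ⟨b, by rw [← hab]⟩
    have hnd : n / a = b := by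
      rw [← hab]; exact Int.mul_ediv_cancel_left b (by omega)
    have h4 : (4:Int) ∣ (n / a - a) := by rw [hnd]; exact ⟨y, by omega⟩
    obtain ⟨hpa, h2x, h4y⟩ := pA_parts n a hn ha1 hdvd h4
    rw [hnd] at h2x h4y
    refine List.mem_map.mpr ⟨a, List.mem_filter.mpr ⟨PySem.List.mem_pyRange_one.mpr ⟨ha1, by omega⟩, hpa⟩, ?_⟩
    have hxe : pvXA n a = x := by omega
    have hye : pvYA n a = y := by omega
    simp [pvGA, hxe, hye, hu]

-- A's list is strictly descending in the y-column
theorem pairwise_A (n : Int) (hn : 1 ≤ n) (hND : pvDup n = false) :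
    (((PySem.List.pyRange 1 ((Nat.sqrt n.toNat : Int) + 1) 1).filter (pvPA n)).map (pvGA n)).Pairwise
      (fun u v => pvKey v < pvKey u) := by
  rw [List.pairwise_map]
  have hp : ((PySem.List.pyRange 1 ((Nat.sqrt n.toNat : Int) + 1) 1).filter (pvPA n)).Pairwise (· < ·) :=
    (PySem.List.pairwise_lt_pyRange_one 1 ((Nat.sqrt n.toNat : Int) + 1)).filter _
  refine hp.imp_of_mem ?_
  intro a1 a2 h1 h2 hlt
  obtain ⟨hr1, hq1⟩ := List.mem_filter.mp h1
  obtain ⟨hr2, hq2⟩ := List.mem_filter.mp h2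
  obtain ⟨ha1, _⟩ := PySem.List.mem_pyRange_one.mp hr1
  obtain ⟨ha2, _⟩ := PySem.List.mem_pyRange_one.mp hr2
  obtain ⟨hdvd1, h41⟩ := pA_imp n a1 hn ha1 hND hq1
  obtain ⟨hdvd2, h42⟩ := pA_imp n a2 hn ha2 hND hq2
  obtain ⟨_, _, h4y1⟩ := pA_parts n a1 hn ha1 hdvd1 h41
  obtain ⟨_, _, h4y2⟩ := pA_parts n a2 hn ha2 hdvd2 h42
  have hab1 : a1 * (n / a1) = n := by rw [mul_comm]; exact Int.ediv_mul_cancel hdvd1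
  have hab2 : a2 * (n / a2) = n := by rw [mul_comm]; exact Int.ediv_mul_cancel hdvd2
  have hb1 : 1 ≤ n / a1 := pv_cofactor_pos n a1 _ hn ha1 hab1
  have hb2 : 1 ≤ n / a2 := pv_cofactor_pos n a2 _ hn ha2 hab2
  have hbb : n / a2 < n / a1 := by nlinarith
  have : pvYA n a2 < pvYA n a1 := by omega
  simpa [pvKey, pvGA] using this

-- strict pairwise order in the key gives Nodup
theorem pv_nodup_of_pairwise {l : List (List Int)} (h : l.Pairwise (fun u v => pvKey v < pvKey u)) :
    l.Nodup :=
  h.imp (fun hlt => by intro he; rw [he] at hlt; exact lt_irrefl _ hlt)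

-- ----- the factorization phase of B -----

-- "no divisor between 2 and q": for q ≥ 2 this is primality (pvPP_prime below)
def pvPP (q : Int) : Prop := 2 ≤ q ∧ ∀ d : Int, 2 ≤ d → d < q → ¬ d ∣ q

def pvProdF : List (Int × Int) → Int
  | [] => 1
  | pe :: l => pe.1 ^ pe.2.toNat * pvProdF l

theorem pvProdF_append (l1 l2 : List (Int × Int)) :
    pvProdF (l1 ++ l2) = pvProdF l1 * pvProdF l2 := by
  induction l1 with
  | nil => simp [pvProdF]
  | cons pe l ih => simp [pvProdF, ih]; ring

theorem pvPP_prime (q : Int) (h : pvPP q) : Nat.Prime q.natAbs := by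
  obtain ⟨h2, hnd⟩ := h
  rw [Nat.prime_def_lt]
  constructor
  · omega
  · intro m hm hdvd
    by_contra hm1
    have hm0 : m ≠ 0 := by
      rintro rfl
      have : q.natAbs = 0 := Nat.eq_zero_of_zero_dvd hdvd
      omega
    have hm2 : 2 ≤ m := by omega
    have hdq : (m : Int) ∣ q := by
      rw [← Int.natAbs_dvd_natAbs]
      simpa using hdvd
    exact hnd (m : Int) (by exact_mod_cast hm2) (by omega) hdq

-- a number ≥ 2 never divides 1
theorem pv_not_dvd_one (q : Int) (hq : 2 ≤ q) : ¬ q ∣ 1 := by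
  intro h
  have := Int.le_of_dvd (by omega) h
  omega

-- the inner division loop: with fuel ≥ m it extracts the full power of p
theorem pvDivOut_ok : ∀ (f : Nat) (m p e : Int), 2 ≤ p → 1 ≤ m → m.toNat ≤ f →
    1 ≤ (pvDivOutFuel f m p e).1 ∧ ¬ p ∣ (pvDivOutFuel f m p e).1 ∧
    ∃ k : Nat, (pvDivOutFuel f m p e).2 = e + k ∧ m = (pvDivOutFuel f m p e).1 * p ^ k := by
  intro f
  induction f with
  | zero => intro m p e hp hm hf; omega
  | succ f ih =>
    intro m p e hp hm hf
    by_cases hmod : PySem.Int.mod m p == 0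
    · have hdvd : p ∣ m := (PySem.Int.mod_eq_zero_iff_dvd m p).mp (beq_iff_eq.mp hmod)
      have hm1 : PySem.Int.floordiv m p = m / p := PySem.Int.floordiv_eq_ediv_of_pos (by omega)
      have hmp : (m / p) * p = m := Int.ediv_mul_cancel hdvd
      have hm1pos : 1 ≤ m / p := by nlinarith
      have hlt : m / p < m := by nlinarith
      have hfu : (m / p).toNat ≤ f := by omega
      have hres : pvDivOutFuel (f + 1) m p e = pvDivOutFuel f (PySem.Int.floordiv m p) p (e + 1) := by
        simp [pvDivOutFuel, hmod]
      rw [hres, hm1]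
      obtain ⟨h1, h2, k, hk1, hk2⟩ := ih (m / p) p (e + 1) hp hm1pos hfu
      refine ⟨h1, h2, k + 1, by omega, ?_⟩
      rw [pow_succ]
      calc m = (m / p) * p := hmp.symm
      _ = ((pvDivOutFuel f (m / p) p (e + 1)).1 * p ^ k) * p := by rw [← hk2]
      _ = (pvDivOutFuel f (m / p) p (e + 1)).1 * (p ^ k * p) := by ring
    · have hres : pvDivOutFuel (f + 1) m p e = (m, e) := by
        simp [pvDivOutFuel, hmod]
      rw [hres]
      refine ⟨hm, ?_, 0, by omega, by simp⟩
      intro hdvd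
      exact absurd (beq_iff_eq.mpr ((PySem.Int.mod_eq_zero_iff_dvd m p).mpr hdvd)) (by simpa using hmod)

-- the outer trial-division loop: invariant and full characterization of the factorization
theorem pvFact_ok : ∀ (f : Nat) (fac : List (Int × Int)) (m p : Int), 2 ≤ p → 1 ≤ m →
    (∀ d : Int, 2 ≤ d → d < p → ¬ d ∣ m) → (m + 2 - p).toNat ≤ f →
    ∃ new : List (Int × Int),
      (pvFactFuel f fac m p).1 = fac ++ new ∧
      m = pvProdF new * (pvFactFuel f fac m p).2 ∧
      1 ≤ (pvFactFuel f fac m p).2 ∧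
      ((pvFactFuel f fac m p).2 = 1 ∨ pvPP (pvFactFuel f fac m p).2) ∧
      (∀ pe ∈ new, p ≤ pe.1 ∧ 1 ≤ pe.2 ∧ pvPP pe.1 ∧ ¬ pe.1 ∣ (pvFactFuel f fac m p).2) ∧
      (new.map Prod.fst).Pairwise (· < ·) := by
  intro f
  induction f with
  | zero =>
    intro fac m p hp hm hinv hf
    refine ⟨[], by simp [pvFactFuel], by simp [pvFactFuel, pvProdF], by simp [pvFactFuel]; omega, ?_, by simp, by simp⟩
    simp only [pvFactFuel]
    rcases eq_or_lt_of_le hm with h1 | h1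
    · exact Or.inl h1.symm
    · refine Or.inr ⟨by omega, fun d hd2 hdm hdvd => hinv d hd2 (by omega) hdvd⟩
  | succ f ih =>
    intro fac m p hp hm hinv hf
    by_cases hguard : p * p ≤ m
    · have hpm : p ≤ m := by nlinarith
      by_cases hmod : PySem.Int.mod m p == 0
      · -- extract the full power of p
        have hdvd : p ∣ m := (PySem.Int.mod_eq_zero_iff_dvd m p).mp (beq_iff_eq.mp hmod)
        obtain ⟨hm1pos, hnd1, k, hk1, hk2⟩ := pvDivOut_ok m.toNat m p 0 hp hm le_rfl
        set m1 : Int := (pvDivOutFuel m.toNat m p 0).1 with hm1def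
        have hk0 : k ≠ 0 := by
          rintro rfl
          simp at hk2
          rw [← hk2] at hnd1
          exact hnd1 hdvd
        have hpk : p ≤ p ^ k := le_self_pow₀ (by omega) hk0
        have hm2m : 2 * m1 ≤ m := by nlinarith
        have hres : pvFactFuel (f + 1) fac m p =
            pvFactFuel f (fac ++ [(p, (pvDivOutFuel m.toNat m p 0).2)]) m1 (p + 1) := by
          simp only [pvFactFuel, hmod, if_pos hguard, if_true]
          rw [hm1def]
        have hinv1 : ∀ d : Int, 2 ≤ d → d < p + 1 → ¬ d ∣ m1 := by
          intro d hd2 hdp hdvd'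
          rcases eq_or_lt_of_le (by omega : d ≤ p) with h | h
          · rw [h] at hdvd'; exact hnd1 hdvd'
          · exact hinv d hd2 h (hdvd'.trans ⟨p ^ k, hk2⟩)
        have hfu1 : (m1 + 2 - (p + 1)).toNat ≤ f := by omega
        obtain ⟨new', hfac', hprod', hpos', hppf', hent', hpair'⟩ :=
          ih (fac ++ [(p, (pvDivOutFuel m.toNat m p 0).2)]) m1 (p + 1) (by omega) hm1pos hinv1 hfu1
        have hPPp : pvPP p := by
          refine ⟨hp, fun d hd2 hdp hddvd => hinv d hd2 hdp (hddvd.trans hdvd)⟩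
        have hfinal_dvd_m1 : (pvFactFuel f (fac ++ [(p, (pvDivOutFuel m.toNat m p 0).2)]) m1 (p + 1)).2 ∣ m1 :=
          ⟨pvProdF new', by rw [mul_comm]; exact hprod'⟩
        refine ⟨(p, (pvDivOutFuel m.toNat m p 0).2) :: new', ?_, ?_, ?_, ?_, ?_, ?_⟩
        · rw [hres, hfac']; simp
        · rw [hres]
          have : pvProdF ((p, (pvDivOutFuel m.toNat m p 0).2) :: new') =
              p ^ k * pvProdF new' := by
            simp [pvProdF, hk1]
          rw [this]
          calc m = m1 * p ^ k := hk2
          _ = p ^ k * (pvProdF new' * (pvFactFuel f (fac ++ [(p, (pvDivOutFuel m.toNat m p 0).2)]) m1 (p + 1)).2) := by rw [← hprod']; ring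
          _ = _ := by ring
        · rw [hres]; exact hpos'
        · rw [hres]; exact hppf'
        · rw [hres]
          intro pe hpe
          rcases List.mem_cons.mp hpe with h | h
          · subst h
            refine ⟨le_refl _, by omega, hPPp, fun hc => hnd1 (hc.trans hfinal_dvd_m1)⟩
          · obtain ⟨hle, he1, hpp, hnd⟩ := hent' pe h
            exact ⟨by omega, he1, hpp, hnd⟩
        · rw [List.map_cons]
          refine List.pairwise_cons.mpr ⟨?_, hpair'⟩
          intro q hq
          obtain ⟨pe, hpe, hq'⟩ := List.mem_map.mp hq
          have := (hent' pe hpe).1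
          omega
      · -- p does not divide m: move on
        have hres : pvFactFuel (f + 1) fac m p = pvFactFuel f fac m (p + 1) := by
          simp [pvFactFuel, hguard, hmod]
        have hndm : ¬ p ∣ m := by
          intro hdvd
          exact absurd (beq_iff_eq.mpr ((PySem.Int.mod_eq_zero_iff_dvd m p).mpr hdvd)) (by simpa using hmod)
        have hinv1 : ∀ d : Int, 2 ≤ d → d < p + 1 → ¬ d ∣ m := by
          intro d hd2 hdp
          rcases eq_or_lt_of_le (by omega : d ≤ p) with h | h
          · rw [h]; exact hndm
          · exact hinv d hd2 h
        have hfu1 : (m + 2 - (p + 1)).toNat ≤ f := by omega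
        obtain ⟨new', hfac', hprod', hpos', hppf', hent', hpair'⟩ := ih fac m (p + 1) (by omega) hm hinv1 hfu1
        rw [hres]
        refine ⟨new', hfac', hprod', hpos', hppf', ?_, hpair'⟩
        intro pe hpe
        obtain ⟨hle, he1, hpp, hnd⟩ := hent' pe hpe
        exact ⟨by omega, he1, hpp, hnd⟩
    · -- loop exit: m has no divisor d with 2 ≤ d < p, and p² > m, so m = 1 or m is prime
      have hres : pvFactFuel (f + 1) fac m p = (fac, m) := by
        simp [pvFactFuel, hguard]
      rw [hres]
      refine ⟨[], by simp, by simp [pvProdF], hm, ?_, by simp, by simp⟩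
      rcases eq_or_lt_of_le hm with h1 | h1
      · exact Or.inl h1.symm
      · refine Or.inr ⟨by omega, ?_⟩
        intro d hd2 hdm hdvd
        obtain ⟨c, hc⟩ := hdvd
        have hc1 : 1 ≤ c := pv_cofactor_pos m d c (by omega) (by omega) hc.symm
        have hc2 : 2 ≤ c := by
          rcases eq_or_lt_of_le hc1 with h | h
          · exfalso; rw [← h] at hc; omega
          · omega
        rcases lt_or_ge d p with hdp | hdp
        · exact hinv d hd2 hdp ⟨c, hc⟩
        · have hcp : c < p := by nlinarith
          exact hinv c hc2 hcp ⟨d, by linarith [hc, mul_comm c d]⟩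

-- ----- the divisor-generation phase of B -----

def pvStep (divs : List Int) (pe : Int × Int) : List Int :=
  divs.flatMap (fun d => (PySem.List.pyRange 0 (pe.2 + 1) 1).map (fun i => d * pe.1 ^ i.toNat))

-- membership in one expansion step
theorem pvStep_mem (divs : List Int) (q e d : Int) :
    d ∈ pvStep divs (q, e) ↔ ∃ d0 ∈ divs, ∃ i : Int, 0 ≤ i ∧ i < e + 1 ∧ d = d0 * q ^ i.toNat := by
  unfold pvStep
  rw [List.mem_flatMap]
  constructor
  · rintro ⟨d0, hd0, hd⟩
    obtain ⟨i, hi, hdi⟩ := List.mem_map.mp hd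
    obtain ⟨hi0, hie⟩ := PySem.List.mem_pyRange_one.mp hi
    exact ⟨d0, hd0, i, hi0, hie, hdi.symm⟩
  · rintro ⟨d0, hd0, i, hi0, hie, hd⟩
    exact ⟨d0, hd0, List.mem_map.mpr ⟨i, PySem.List.mem_pyRange_one.mpr ⟨hi0, hie⟩, hd.symm⟩⟩

-- powers of a base ≥ 2 are injective in the exponent
theorem pv_pow_inj (q : Int) (hq : 2 ≤ q) {a b : Nat} (h : q ^ a = q ^ b) : a = b := by
  rcases Nat.lt_trichotomy a b with hl | he | hl
  · exfalso; have := pow_lt_pow_right₀ (by omega : (1:Int) < q) hl; omega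
  · exact he
  · exfalso; have := pow_lt_pow_right₀ (by omega : (1:Int) < q) hl; omega

-- cancelling a common power: if d0 q^a = d0' q^b with q ∤ d0, q ∤ d0', then a = b and d0 = d0'
theorem pv_cancel_pow (q d0 d0' : Int) (hq : 2 ≤ q) (h0 : ¬ q ∣ d0) (h0' : ¬ q ∣ d0')
    {a b : Nat} (h : d0 * q ^ a = d0' * q ^ b) : a = b ∧ d0 = d0' := by
  have hqa : (q : Int) ^ a ≠ 0 := pow_ne_zero _ (by omega)
  have hqb : (q : Int) ^ b ≠ 0 := pow_ne_zero _ (by omega)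
  rcases Nat.le_total a b with hab | hab
  · have hsplit : q ^ b = q ^ (b - a) * q ^ a := by
      rw [← pow_add]
      congr 1
      omega
    rw [hsplit] at h
    have hcancel : d0 = d0' * q ^ (b - a) := by
      have := mul_right_cancel₀ hqa (by linarith [h] : d0 * q ^ a = (d0' * q ^ (b - a)) * q ^ a)
      linarith [this]
    rcases Nat.eq_zero_or_pos (b - a) with hz | hpos
    · rw [hz] at hcancel
      simp at hcancel
      exact ⟨by omega, hcancel⟩
    · exfalso
      apply h0
      rw [hcancel]
      exact dvd_mul_of_dvd_right (dvd_pow_self q (by omega)) d0'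
  · have hsplit : q ^ a = q ^ (a - b) * q ^ b := by
      rw [← pow_add]
      congr 1
      omega
    rw [hsplit] at h
    have hcancel : d0 * q ^ (a - b) = d0' := by
      have := mul_right_cancel₀ hqb (by linarith [h] : (d0 * q ^ (a - b)) * q ^ b = d0' * q ^ b)
      linarith [this]
    rcases Nat.eq_zero_or_pos (a - b) with hz | hpos
    · rw [hz] at hcancel
      simp at hcancel
      exact ⟨by omega, hcancel⟩
    · exfalso
      apply h0'
      rw [← hcancel]
      exact dvd_mul_of_dvd_right (dvd_pow_self q (by omega)) d0

-- one expansion step is sound, complete and duplicate-free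
theorem pvStep_ok (divs0 : List Int) (P q e : Int) (hP : 1 ≤ P) (hq : pvPP q) (he : 1 ≤ e)
    (hqP : ¬ q ∣ P) (hnd : divs0.Nodup) (hmem : ∀ d, d ∈ divs0 ↔ 1 ≤ d ∧ d ∣ P) :
    (pvStep divs0 (q, e)).Nodup ∧
    ∀ d, d ∈ pvStep divs0 (q, e) ↔ 1 ≤ d ∧ d ∣ P * q ^ e.toNat := by
  have hq2 : 2 ≤ q := hq.1
  have hqprime : Nat.Prime q.natAbs := pvPP_prime q hq
  have hqnd : ∀ d0, d0 ∈ divs0 → ¬ q ∣ d0 := by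
    intro d0 hd0 hdvd
    exact hqP (hdvd.trans ((hmem d0).mp hd0).2)
  constructor
  · -- Nodup
    unfold pvStep
    rw [List.nodup_flatMap]
    constructor
    · intro d0 hd0
      have hd01 : 1 ≤ d0 := ((hmem d0).mp hd0).1
      refine (PySem.List.nodup_pyRange_one 0 (e + 1)).map_on ?_
      intro i hi j hj hij
      obtain ⟨hi0, _⟩ := PySem.List.mem_pyRange_one.mp hi
      obtain ⟨hj0, _⟩ := PySem.List.mem_pyRange_one.mp hj
      have : q ^ i.toNat = q ^ j.toNat := by
        have h0 : d0 ≠ 0 := by omega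
        exact mul_left_cancel₀ h0 hij
      have := pv_pow_inj q hq2 this
      omega
    · refine hnd.imp_of_mem ?_
      intro d0 d0' hd0 hd0' hne
      intro x hx hx'
      obtain ⟨i, hi, hxi⟩ := List.mem_map.mp hx
      obtain ⟨j, hj, hxj⟩ := List.mem_map.mp hx'
      have heq : d0 * q ^ i.toNat = d0' * q ^ j.toNat := by rw [hxi, hxj]
      exact hne (pv_cancel_pow q d0 d0' hq2 (hqnd d0 hd0) (hqnd d0' hd0') heq).2
  · -- membership
    intro d
    rw [pvStep_mem]
    constructor
    · rintro ⟨d0, hd0, i, hi0, hie, hd⟩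
      obtain ⟨hd01, hd0P⟩ := (hmem d0).mp hd0
      have hpow1 : (1:Int) ≤ q ^ i.toNat := one_le_pow₀ (by omega)
      refine ⟨by nlinarith [hd], ?_⟩
      rw [hd]
      exact mul_dvd_mul hd0P (pow_dvd_pow q (by omega))
    · rintro ⟨hd1, hdvd⟩
      have hE : (0:Int) ≤ e := by omega
      have hnatdvd : d.natAbs ∣ P.natAbs * q.natAbs ^ e.toNat := by
        have := Int.natAbs_dvd_natAbs.mpr hdvd
        rwa [Int.natAbs_mul, Int.natAbs_pow] at this
      obtain ⟨a, b, haP, hbq, hab⟩ := Nat.dvd_mul.mp hnatdvd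
      obtain ⟨i, hile, hbi⟩ := (Nat.dvd_prime_pow hqprime).mp hbq
      have ha1 : 1 ≤ a := by
        rcases Nat.eq_zero_or_pos a with h | h
        · exfalso; rw [h] at hab; simp at hab; omega
        · omega
      have haPdvd : (a : Int) ∣ P := by
        rw [← Int.natAbs_dvd_natAbs]
        simpa using haP
      have hqabs : ((q.natAbs : Int)) = q := by omega
      have hdval : d = (a : Int) * q ^ i := by
        have hnat : d.natAbs = a * q.natAbs ^ i := by rw [← hab, hbi]
        have hcast : ((d.natAbs : Int)) = ((a : Int)) * ((q.natAbs : Int)) ^ i := by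
          exact_mod_cast hnat
        rw [hqabs] at hcast
        have hdabs : ((d.natAbs : Int)) = d := by omega
        rw [hdabs] at hcast
        exact hcast
      refine ⟨(a : Int), (hmem _).mpr ⟨by exact_mod_cast ha1, haPdvd⟩, (i : Int), by positivity, by omega, ?_⟩
      rw [hdval]
      congr 1
  
-- the divisor-generation fold over a list of distinct prime powers
theorem pvDivs_ok : ∀ (F : List (Int × Int)) (divs0 : List Int) (P : Int), 1 ≤ P →
    (∀ pe ∈ F, pvPP pe.1 ∧ 1 ≤ pe.2 ∧ ¬ pe.1 ∣ P) →
    (F.map Prod.fst).Pairwise (· ≠ ·) →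
    divs0.Nodup → (∀ d, d ∈ divs0 ↔ 1 ≤ d ∧ d ∣ P) →
    (F.foldl pvStep divs0).Nodup ∧
    ∀ d, d ∈ F.foldl pvStep divs0 ↔ 1 ≤ d ∧ d ∣ P * pvProdF F := by
  intro F
  induction F with
  | nil =>
    intro divs0 P hP hent hpair hnd hmem
    simp only [List.foldl_nil, pvProdF, mul_one]
    exact ⟨hnd, hmem⟩
  | cons pe F' ih =>
    intro divs0 P hP hent hpair hnd hmem
    obtain ⟨q, e⟩ := pe
    obtain ⟨hqPP, he1, hqP⟩ := hent (q, e) List.mem_cons_self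
    have hq2 : 2 ≤ q := hqPP.1
    obtain ⟨hnd1, hmem1⟩ := pvStep_ok divs0 P q e hP hqPP he1 hqP hnd hmem
    have hP1 : 1 ≤ P * q ^ e.toNat := by
      have : (1:Int) ≤ q ^ e.toNat := one_le_pow₀ (by omega)
      nlinarith
    have hpair2 : (q :: F'.map Prod.fst).Pairwise (fun a b => a ≠ b) := by simpa using hpair
    have hpair' := List.pairwise_cons.mp hpair2
    have hent1 : ∀ pe' ∈ F', pvPP pe'.1 ∧ 1 ≤ pe'.2 ∧ ¬ pe'.1 ∣ P * q ^ e.toNat := by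
      intro pe' hpe'
      obtain ⟨hpp', he1', hndP'⟩ := hent pe' (List.mem_cons_of_mem _ hpe')
      refine ⟨hpp', he1', ?_⟩
      intro hdvd'
      have hprime' : Nat.Prime pe'.1.natAbs := pvPP_prime pe'.1 hpp'
      have hqprime : Nat.Prime q.natAbs := pvPP_prime q hqPP
      have hnat : pe'.1.natAbs ∣ P.natAbs * q.natAbs ^ e.toNat := by
        have := Int.natAbs_dvd_natAbs.mpr hdvd'
        rwa [Int.natAbs_mul, Int.natAbs_pow] at this
      rcases (Nat.Prime.dvd_mul hprime').mp hnat with h | h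
      · exact hndP' (by rw [← Int.natAbs_dvd_natAbs]; simpa using h)
      · have := hprime'.dvd_of_dvd_pow h
        have heq := (Nat.prime_dvd_prime_iff_eq hprime' hqprime).mp this
        have : pe'.1 = q := by
          have h2' : 2 ≤ pe'.1 := hpp'.1
          omega
        exact hpair'.1 pe'.1 (List.mem_map.mpr ⟨pe', hpe', rfl⟩) this.symm
    obtain ⟨hndr, hmemr⟩ := ih (pvStep divs0 (q, e)) (P * q ^ e.toNat) hP1 hent1 hpair'.2 hnd1 hmem1
    refine ⟨by simpa using hndr, ?_⟩
    intro d
    rw [List.foldl_cons]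
    rw [hmemr d]
    have : P * q ^ e.toNat * pvProdF F' = P * pvProdF ((q, e) :: F') := by
      simp [pvProdF]; ring
    rw [this]

-- B's output characterized: a filter-map over a strictly increasing list of all divisors of n
theorem sol_equa_alt_char (n : Int) (hn : 1 ≤ n) :
    ∃ ds : List Int, sol_equa_alt n = (ds.filter (pvPB n)).map (pvGA n) ∧
      ds.Pairwise (· < ·) ∧ (∀ d, d ∈ ds ↔ 1 ≤ d ∧ d ∣ n) := by
  have hnle : ¬ n ≤ 0 := by omega
  obtain ⟨new, hfac, hprod, hpos, hppf, hent, hpair⟩ :=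
    pvFact_ok (n.toNat + 2) [] n 2 (by omega) hn
      (by intro d hd2 hdp; omega) (by omega)
  set mfin : Int := (pvFactFuel (n.toNat + 2) [] n 2).2 with hmfin
  set F : List (Int × Int) := if 1 < mfin then (pvFactFuel (n.toNat + 2) [] n 2).1 ++ [(mfin, 1)]
    else (pvFactFuel (n.toNat + 2) [] n 2).1 with hF
  -- the full factor list multiplies to n, has distinct bases, all pvPP with exponents ≥ 1
  have hFprod : pvProdF F = n := by
    rw [hF]
    by_cases hm1 : 1 < mfin
    · rw [if_pos hm1, hfac, pvProdF_append]
      simp only [List.nil_append, pvProdF]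
      have : mfin ^ (1:Int).toNat = mfin := by norm_num
      rw [this]
      linarith [hprod]
    · rw [if_neg hm1, hfac]
      simp only [List.nil_append]
      have : mfin = 1 := by omega
      rw [this] at hprod
      linarith [hprod]
  have hFent : ∀ pe ∈ F, pvPP pe.1 ∧ 1 ≤ pe.2 ∧ ¬ pe.1 ∣ 1 := by
    intro pe hpe
    have hofnew : pe ∈ new → pvPP pe.1 ∧ 1 ≤ pe.2 ∧ ¬ pe.1 ∣ 1 := by
      intro h
      obtain ⟨_, he1, hpp, _⟩ := hent pe h
      exact ⟨hpp, he1, pv_not_dvd_one pe.1 hpp.1⟩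
    rw [hF] at hpe
    by_cases hm1 : 1 < mfin
    · rw [if_pos hm1, hfac, List.nil_append] at hpe
      rcases List.mem_append.mp hpe with h | h
      · exact hofnew h
      · have hpe' : pe = (mfin, 1) := by simpa using h
        subst hpe'
        have hppm : pvPP mfin := by
          rcases hppf with h1 | h1
          · omega
          · exact h1
        exact ⟨hppm, by norm_num, pv_not_dvd_one mfin (by omega)⟩
    · rw [if_neg hm1, hfac, List.nil_append] at hpe
      exact hofnew hpe
  have hFpair : (F.map Prod.fst).Pairwise (· ≠ ·) := by
    rw [hF]
    by_cases hm1 : 1 < mfin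
    · rw [if_pos hm1, hfac, List.nil_append, List.map_append]
      rw [List.pairwise_append]
      refine ⟨hpair.imp (fun h => by omega), by simp, ?_⟩
      intro q hq b hb
      have hbm : b = mfin := by simpa using hb
      obtain ⟨pe, hpe, hq'⟩ := List.mem_map.mp hq
      obtain ⟨_, _, _, hndf⟩ := hent pe hpe
      subst hq'
      rw [hbm]
      intro hc
      rw [hc] at hndf
      exact hndf dvd_rfl
    · rw [if_neg hm1, hfac, List.nil_append]
      exact hpair.imp (fun h => by omega)
  have hdivs := pvDivs_ok F [1] 1 le_rfl hFent hFpair (by simp)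
    (by
      intro d
      simp only [List.mem_singleton]
      constructor
      · rintro rfl; exact ⟨le_rfl, dvd_rfl⟩
      · rintro ⟨h1, hdvd⟩
        exact Int.eq_one_of_dvd_one (by omega) hdvd)
  rw [hFprod, one_mul] at hdivs
  obtain ⟨hndD, hmemD⟩ := hdivs
  set divs : List Int := F.foldl pvStep [1] with hdivsdef
  refine ⟨PySem.List.sorted divs (fun d => d) false, ?_, ?_, ?_⟩
  · -- the port's value is exactly this filter-map
    show sol_equa_alt n = _
    rw [sol_equa_alt]
    rw [if_neg hnle]
    rw [B_loop_eq_filter n]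
    rfl
  · -- strictly increasing: sorted gives ≤, nodup gives ≠
    have hperm : (PySem.List.sorted divs (fun d => d) false).Perm divs := PySem.List.sorted_perm divs _ _
    have hndS : (PySem.List.sorted divs (fun d => d) false).Nodup := hperm.symm.nodup hndD
    have hle : (PySem.List.sorted divs (fun d => d) false).Pairwise (fun a b => a ≤ b) :=
      PySem.List.sorted_pairwise divs (fun d => d)
    have := hle.and hndS
    exact this.imp (fun h => lt_of_le_of_ne h.1 h.2)
  · intro d
    rw [PySem.List.mem_sorted]
    exact hmemD d

-- membership in B's list = being a solution row
theorem mem_B_iff (n : Int) (hn : 1 ≤ n) (ds : List Int)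
    (hds : ∀ d, d ∈ ds ↔ 1 ≤ d ∧ d ∣ n) (u : List Int) :
    u ∈ ((ds.filter (pvPB n)).map (pvGA n)) ↔ ∃ x y, u = [x, y] ∧ pvSol n x y := by
  constructor
  · rintro hu
    obtain ⟨a, haf, hgu⟩ := List.mem_map.mp hu
    obtain ⟨har, hap⟩ := List.mem_filter.mp haf
    obtain ⟨ha1, hdvd⟩ := (hds a).mp har
    rw [pvPB, Bool.and_eq_true, decide_eq_true_eq, beq_iff_eq] at hap
    have hb : pvBA n a = n / a := PySem.Int.floordiv_eq_ediv_of_pos (by omega)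
    rw [hb] at hap
    obtain ⟨hab', h4'⟩ := hap
    have h4 : (4:Int) ∣ (n / a - a) := (PySem.Int.mod_eq_zero_iff_dvd _ 4).mp h4'
    obtain ⟨_, h2x, h4y⟩ := pA_parts n a hn ha1 hdvd h4
    refine ⟨pvXA n a, pvYA n a, by simp [← hgu, pvGA], ?_, by omega, ?_⟩
    · omega
    · have hab : a * (n / a) = n := by rw [mul_comm]; exact Int.ediv_mul_cancel hdvd
      nlinarith [h2x, h4y, hab]
  · rintro ⟨x, y, hu, hy0, hx1, heq⟩
    set a : Int := x - 2 * y with hadef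
    set b : Int := x + 2 * y with hbdef
    have hab : a * b = n := by rw [hadef, hbdef]; ring_nf; linarith [heq]
    have ha1 : 1 ≤ a := by
      rcases lt_or_ge x (2 * y) with h | h
      · nlinarith
      · rcases eq_or_lt_of_le h with h' | h'
        · exfalso; nlinarith
        · omega
    have hba : b ≥ a := by omega
    have hdvd : a ∣ n := ⟨b, by rw [← hab]⟩
    have hnd : n / a = b := by
      rw [← hab]; exact Int.mul_ediv_cancel_left b (by omega)
    have h4 : (4:Int) ∣ (n / a - a) := by rw [hnd]; exact ⟨y, by omega⟩
    obtain ⟨_, h2x, h4y⟩ := pA_parts n a hn ha1 hdvd h4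
    rw [hnd] at h2x h4y
    have hbfd : pvBA n a = b := by
      rw [pvBA, PySem.Int.floordiv_eq_ediv_of_pos (by omega : (0:Int) < a), hnd]
    have hpb : pvPB n a = true := by
      rw [pvPB, Bool.and_eq_true, decide_eq_true_eq, beq_iff_eq, hbfd]
      refine ⟨hba, (PySem.Int.mod_eq_zero_iff_dvd _ 4).mpr ⟨y, by omega⟩⟩
    refine List.mem_map.mpr ⟨a, List.mem_filter.mpr ⟨(hds a).mpr ⟨ha1, hdvd⟩, hpb⟩, ?_⟩
    have hxe : pvXA n a = x := by omega
    have hye : pvYA n a = y := by omega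
    simp [pvGA, hxe, hye, hu]

-- B's list is strictly descending in the y-column
theorem pairwise_B (n : Int) (hn : 1 ≤ n) (ds : List Int) (hpw : ds.Pairwise (· < ·))
    (hds : ∀ d, d ∈ ds ↔ 1 ≤ d ∧ d ∣ n) :
    ((ds.filter (pvPB n)).map (pvGA n)).Pairwise (fun u v => pvKey v < pvKey u) := by
  rw [List.pairwise_map]
  refine (hpw.filter _).imp_of_mem ?_
  intro a1 a2 h1 h2 hlt
  obtain ⟨hm1, hf1⟩ := List.mem_filter.mp h1
  obtain ⟨hm2, hf2⟩ := List.mem_filter.mp h2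
  obtain ⟨ha1, hdvd1⟩ := (hds a1).mp hm1
  obtain ⟨ha2, hdvd2⟩ := (hds a2).mp hm2
  have hab1 : a1 * (n / a1) = n := by rw [mul_comm]; exact Int.ediv_mul_cancel hdvd1
  have hab2 : a2 * (n / a2) = n := by rw [mul_comm]; exact Int.ediv_mul_cancel hdvd2
  have hb1 : 1 ≤ n / a1 := pv_cofactor_pos n a1 _ hn ha1 hab1
  have hb2 : 1 ≤ n / a2 := pv_cofactor_pos n a2 _ hn ha2 hab2
  have hby1 : pvBA n a1 = n / a1 := PySem.Int.floordiv_eq_ediv_of_pos (by omega)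
  have hby2 : pvBA n a2 = n / a2 := PySem.Int.floordiv_eq_ediv_of_pos (by omega)
  have hbb : n / a2 < n / a1 := by nlinarith
  have hy1 : pvYA n a1 = (n / a1 - a1) / 4 := by
    rw [pvYA, hby1]; exact PySem.Int.floordiv_eq_ediv_of_pos (by omega)
  have hy2 : pvYA n a2 = (n / a2 - a2) / 4 := by
    rw [pvYA, hby2]; exact PySem.Int.floordiv_eq_ediv_of_pos (by omega)
  have h41 : (4:Int) ∣ (n / a1 - a1) := by
    rw [pvPB, Bool.and_eq_true, beq_iff_eq, hby1] at hf1
    exact (PySem.Int.mod_eq_zero_iff_dvd _ 4).mp hf1.2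
  have h42 : (4:Int) ∣ (n / a2 - a2) := by
    rw [pvPB, Bool.and_eq_true, beq_iff_eq, hby2] at hf2
    exact (PySem.Int.mod_eq_zero_iff_dvd _ 4).mp hf2.2
  obtain ⟨c1, hc1⟩ := h41
  obtain ⟨c2, hc2⟩ := h42
  have : pvYA n a2 < pvYA n a1 := by
    rw [hy1, hy2]
    omega
  simpa [pvKey, pvGA] using this

theorem sol_equa_main (n : Int) (hn : 1 ≤ n) (hND : pvDup n = false) : sol_equa n = sol_equa_alt n := by
  obtain ⟨ds, hB, hpw, hds⟩ := sol_equa_alt_char n hn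
  rw [sol_equa_eq_filter, pvIsqrt_eq_sqrt, hB]
  set s : Int := (Nat.sqrt n.toNat : Int) with hsdef
  have hs0 : 0 ≤ s := by positivity
  have hsplit : PySem.List.pyRange 1 (s + 2) 1 = PySem.List.pyRange 1 (s + 1) 1 ++ [s + 1] := by
    have h21 : s + 2 = (s + 1) + 1 := by ring
    rw [h21]
    exact PySem.List.pyRange_one_succ_right (by omega)
  rw [hsplit, List.filter_append]
  have htop : List.filter (pvPA n) [s + 1] = [] := by
    have hfalse : pvPA n (s + 1) = false := pA_top_false n hn hND
    simp [hfalse]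
  rw [htop, List.append_nil]
  have hp1 := pairwise_A n hn hND
  have hp2 := pairwise_B n hn ds hpw hds
  have hmem : ∀ u, u ∈ ((PySem.List.pyRange 1 (s + 1) 1).filter (pvPA n)).map (pvGA n) ↔
      u ∈ (ds.filter (pvPB n)).map (pvGA n) := by
    intro u
    rw [mem_A_iff n hn hND u, mem_B_iff n hn ds hds u]
  have hperm : (((PySem.List.pyRange 1 (s + 1) 1).filter (pvPA n)).map (pvGA n)).Perm
      ((ds.filter (pvPB n)).map (pvGA n)) :=
    (List.perm_ext_iff_of_nodup (pv_nodup_of_pairwise hp1) (pv_nodup_of_pairwise hp2)).mpr hmem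
  exact List.Perm.eq_of_pairwise (fun a b _ _ h1 h2 => absurd h2 (by omega)) hp1 hp2 hperm

-- ===== VERDICT (by name: the statement is the Claim_ definition above) =====
theorem sol_equa_spec : Claim_equal_sol_equa := by
  intro n _ hpre
  obtain ⟨hpre0, hND⟩ := hpre
  unfold Spec_sol_equa
  rcases lt_or_ge n 1 with h | h
  · have h0 : n = 0 := by omega
    subst h0; decide
  · exact (sol_equa_main n h hND).symm ▸ rfl
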